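-- pv_equiv track=rewrite | github.com/Capanu/Python | Tema_Week3.py | rec_function
-- ===== SOURCE A (Python) =====
-- def rec_function(n, my_list = [0,0,0]):
--     res_list = my_list.copy() # copy  the partial result
--     my_list = [0, 0, 0] # set the value  on 0 list, to don t maintain it
--
--
--     if n <= 0:
--         return  res_list
--
--     if n %2 == 0:
--         res_list[1]+= n # even position sum
--     else:
--         res_list[2] += n # oodd position sum
--     res_list[0] += n # position for total sum
--
--     return rec_function(n-1, res_list)
-- ===== SOURCE B (Python) =====
-- def rec_function(n, my_list=[0, 0, 0]):
--     res = my_list.copy()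
--     if n <= 0:
--         return res
--     total = n * (n + 1) // 2          # 1 + 2 + ... + n
--     k = n // 2
--     even = k * (k + 1)                # 2 + 4 + ... + 2k
--     odd = total - even
--     res[0] += total
--     res[1] += even
--     res[2] += odd
--     return res
-- ===== Notes on version B (the rewrite author's own statement) =====
-- stated objective: faster
-- what changed: Replaces the depth-n recursion that accumulates the total/even/odd sums one term at a time with closed-form arithmetic-series formulas (n(n+1)/2, k(k+1) with k=n//2, and their difference) applied in one step.
import Mathlib
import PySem

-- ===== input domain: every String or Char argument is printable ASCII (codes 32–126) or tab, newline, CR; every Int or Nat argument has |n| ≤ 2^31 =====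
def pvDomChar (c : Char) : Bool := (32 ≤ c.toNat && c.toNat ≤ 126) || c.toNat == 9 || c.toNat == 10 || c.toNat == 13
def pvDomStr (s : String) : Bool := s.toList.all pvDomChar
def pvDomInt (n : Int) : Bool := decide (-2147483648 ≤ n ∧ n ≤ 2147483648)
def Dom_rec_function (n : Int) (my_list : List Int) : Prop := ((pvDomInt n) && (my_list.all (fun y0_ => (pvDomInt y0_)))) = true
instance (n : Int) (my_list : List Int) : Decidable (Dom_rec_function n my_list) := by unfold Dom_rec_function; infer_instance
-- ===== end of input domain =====

-- B replaces A's depth-n recursion by closed-form arithmetic-series formulas (O(1) vs O(n)).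

-- ===== PORT A =====
-- literal transliteration of A: peel one term per call, recurse on n-1.
-- res_list[i] += n is ported as set i (getD i 0 + n); under Pre_ (length ≥ 3 when n > 0)
-- the indices 0,1,2 are in range, exactly where Python does not raise IndexError.
def rec_function (n : Int) (my_list : List Int) : List Int :=
  let res_list := my_list
  if n ≤ 0 then res_list
  else
    let res_list :=
      if PySem.Int.mod n 2 == 0 then res_list.set 1 (res_list.getD 1 0 + n)
      else res_list.set 2 (res_list.getD 2 0 + n)
    let res_list := res_list.set 0 (res_list.getD 0 0 + n)
    rec_function (n - 1) res_list
termination_by n.toNat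
decreasing_by omega

-- ===== PORT B =====
def rec_function_alt (n : Int) (my_list : List Int) : List Int :=
  let res := my_list
  if n ≤ 0 then res
  else
    let total := PySem.Int.floordiv (n * (n + 1)) 2
    let k := PySem.Int.floordiv n 2
    let even := k * (k + 1)
    let odd := total - even
    let res := res.set 0 (res.getD 0 0 + total)
    let res := res.set 1 (res.getD 1 0 + even)
    res.set 2 (res.getD 2 0 + odd)

-- ===== PRECONDITION & SPEC =====
-- Pre_ excludes exactly the inputs where Python A raises IndexError: n > 0 with fewer
-- than 3 elements in my_list (both indices 1/2 and 0 are assigned on every step).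
def Pre_rec_function (n : Int) (my_list : List Int) : Prop := n ≤ 0 ∨ 3 ≤ my_list.length
instance (n : Int) (my_list : List Int) : Decidable (Pre_rec_function n my_list) := by unfold Pre_rec_function; infer_instance
def pvWitness_rec_function : Int × List Int := (5, [0, 0, 0])
def Spec_rec_function (n : Int) (my_list : List Int) (out : List Int) : Prop := out = rec_function_alt n my_list
instance (n : Int) (my_list : List Int) (out : List Int) : Decidable (Spec_rec_function n my_list out) := by unfold Spec_rec_function; infer_instance

-- ===== CLAIM (what is proved, stated in full; the proofs are below) =====
def Claim_equal_rec_function : Prop := ∀ (n : Int) (my_list : List Int), Dom_rec_function n my_list → Pre_rec_function n my_list → Spec_rec_function n my_list (rec_function n my_list)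

-- ===== LEMMAS AND PROOFS =====

-- recursive versions of the three series, indexed by a natural number
def sumT : Nat → Int
  | 0 => 0
  | m + 1 => sumT m + (m + 1)

def sumE : Nat → Int
  | 0 => 0
  | m + 1 => if (m + 1) % 2 = 0 then sumE m + (m + 1) else sumE m

def sumO : Nat → Int
  | 0 => 0
  | m + 1 => if (m + 1) % 2 = 0 then sumO m else sumO m + (m + 1)

-- A computes exactly these running sums on a list of length ≥ 3
theorem rec_function_cons (m : Nat) : ∀ (a b c : Int) (rest : List Int),
    rec_function (m : Int) (a :: b :: c :: rest) =
      (a + sumT m) :: (b + sumE m) :: (c + sumO m) :: rest := by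
  induction m with
  | zero => intro a b c rest; simp [rec_function, sumT, sumE, sumO]
  | succ m ih =>
    intro a b c rest
    rw [rec_function]
    have h0 : ¬ ((m + 1 : Nat) : Int) ≤ 0 := by push_cast; omega
    have hm : PySem.Int.mod ((m + 1 : Nat) : Int) 2 = (((m + 1) % 2 : Nat) : Int) := by
      exact_mod_cast PySem.Int.mod_natCast (m + 1) 2
    have hstep : ((m + 1 : Nat) : Int) - 1 = (m : Int) := by push_cast; ring
    have g0 : ∀ x y z : Int, ∀ l : List Int, (x :: y :: z :: l)[0]?.getD 0 = x := fun _ _ _ _ => rfl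
    have g1 : ∀ x y z : Int, ∀ l : List Int, (x :: y :: z :: l)[1]?.getD 0 = y := fun _ _ _ _ => rfl
    have g2 : ∀ x y z : Int, ∀ l : List Int, (x :: y :: z :: l)[2]?.getD 0 = z := fun _ _ _ _ => rfl
    by_cases he : (m + 1) % 2 = 0
    · simp only [h0, if_false, hm, he, Nat.cast_zero, beq_self_eq_true, if_true,
        List.set, List.getD, g0, g1, g2]
      rw [hstep, ih]
      simp only [sumT, sumE, sumO, he, if_true, List.cons.injEq, and_true]
      and_intros <;> first | trivial | (push_cast; ring)
    · have hne : ((((m + 1) % 2 : Nat) : Int) == 0) = false := by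
        simp; omega
      simp only [h0, if_false, hm, hne, Bool.false_eq_true, List.set, List.getD, g0, g1, g2]
      rw [hstep, ih]
      simp only [sumT, sumE, sumO, he, if_false, List.cons.injEq, and_true]
      and_intros <;> first | trivial | (push_cast; ring)

-- closed forms for the three series
theorem sumT_closed (m : Nat) : sumT m = PySem.Int.floordiv ((m : Int) * ((m : Int) + 1)) 2 := by
  induction m with
  | zero => simp [sumT]
  | succ m ih =>
    have h1 : PySem.Int.floordiv ((m : Int) * ((m : Int) + 1)) 2 = (m : Int) * ((m : Int) + 1) / 2 :=
      PySem.Int.floordiv_eq_ediv_of_pos (by omega)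
    rw [sumT, ih, h1]
    push_cast
    rw [PySem.Int.floordiv_eq_ediv_of_pos (b := 2) (by omega)]
    have hr : ((m : Int) + 1) * ((m : Int) + 1 + 1) = (m : Int) * ((m : Int) + 1) + 2 * ((m : Int) + 1) := by
      ring
    omega

theorem sumE_closed (m : Nat) :
    sumE m = PySem.Int.floordiv (m : Int) 2 * (PySem.Int.floordiv (m : Int) 2 + 1) := by
  induction m with
  | zero => simp [sumE]
  | succ m ih =>
    have h1 : PySem.Int.floordiv (m : Int) 2 = (m : Int) / 2 :=
      PySem.Int.floordiv_eq_ediv_of_pos (by omega)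
    rw [sumE, ih, h1]
    push_cast
    rw [PySem.Int.floordiv_eq_ediv_of_pos (b := 2) (by omega)]
    by_cases he : (m + 1) % 2 = 0
    · simp only [he, if_true]
      have hm2 : (m : Int) % 2 = 1 := by omega
      have hq : ((m : Int) + 1) / 2 = (m : Int) / 2 + 1 := by omega
      rw [hq]
      nlinarith [Int.mul_ediv_add_emod (m : Int) 2]
    · simp only [he, if_false]
      have hq : ((m : Int) + 1) / 2 = (m : Int) / 2 := by omega
      rw [hq]

theorem sumO_closed (m : Nat) : sumO m = sumT m - sumE m := by
  induction m with
  | zero => simp [sumO, sumT, sumE]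
  | succ m ih =>
    rw [sumO, sumT, sumE]
    by_cases he : (m + 1) % 2 = 0 <;> simp [he, ih] <;> try ring

-- ===== VERDICT (by name: the statement is the Claim_ definition above) =====
theorem rec_function_spec : Claim_equal_rec_function := by
  intro n my_list _ hpre
  unfold Spec_rec_function
  by_cases hn : n ≤ 0
  · rw [rec_function, rec_function_alt]
    simp [hn]
  · rcases hpre with h | h
    · omega
    · match my_list, h with
      | a :: b :: c :: rest, _ =>
        have hn' : n = ((n.toNat : Nat) : Int) := by omega
        have hpos : 0 < n.toNat := by omega
        rw [hn', rec_function_cons]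
        rw [rec_function_alt]
        have h0 : ¬ ((n.toNat : Nat) : Int) ≤ 0 := by omega
        simp only [h0, if_false, List.set, List.getD, List.getElem?_cons_zero, Option.getD_some, List.getElem?_cons_succ]
        rw [sumT_closed, sumE_closed, sumO_closed, sumT_closed, sumE_closed]
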